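-- pv_equiv track=rewrite | github.com/aaravzen/Wordle | solver.py | calculate_new_colors
-- ===== SOURCE A (Python) =====
-- def calculate_new_colors(guess,response,greens,yellows,reds,singles,multiples):
--     new_greens = ""
--     good_letters = set()
--     for idx,color in enumerate(response):
--         if color.upper() == "G":
--             new_greens += guess[idx]
--             if guess[idx] in good_letters:
--                 multiples.add(guess[idx])
--             good_letters.add(guess[idx])
--         elif color.upper() == "Y":
--             yellows.append((guess[idx],idx))
--             new_greens += greens[idx]
--             if guess[idx] in good_letters:
--                 multiples.add(guess[idx])
--             good_letters.add(guess[idx])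
--         else:
--             new_greens += greens[idx]
--
--     for idx,color in enumerate(response):
--         if color.upper() != "G" and color.upper() != "Y":
--             if guess[idx] not in good_letters:
--                 reds += guess[idx]
--             else:
--                 singles.add(guess[idx])
--     return new_greens,reds
-- ===== SOURCE B (Python) =====
-- def calculate_new_colors(guess, response, greens, yellows, reds, singles, multiples):
--     # one pass of comprehensions over enumerate(response) instead of incremental set threading
--     gy = [guess[i] for i, c in enumerate(response) if c.upper() in ("G", "Y")]
--     good_letters = set(gy)
--     for ch in good_letters:
--         if gy.count(ch) >= 2:
--             multiples.add(ch)
--     yellows.extend((guess[i], i) for i, c in enumerate(response) if c.upper() == "Y")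
--     new_greens = "".join(guess[i] if c.upper() == "G" else greens[i]
--                          for i, c in enumerate(response))
--     bad = [guess[i] for i, c in enumerate(response) if c.upper() not in ("G", "Y")]
--     reds += "".join(ch for ch in bad if ch not in good_letters)
--     singles.update(ch for ch in bad if ch in good_letters)
--     return new_greens, reds
-- ===== Notes on version B (the rewrite author's own statement) =====
-- stated objective: simpler
-- what changed: Replaces A's two stateful loops that thread an incrementally grown good_letters set with independent comprehensions over enumerate(response): the G/Y letter list is built once, good_letters = set of it, multiples derived from counts >= 2, and new_greens/reds/yellows/singles each come from one direct comprehension.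
import Mathlib
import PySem

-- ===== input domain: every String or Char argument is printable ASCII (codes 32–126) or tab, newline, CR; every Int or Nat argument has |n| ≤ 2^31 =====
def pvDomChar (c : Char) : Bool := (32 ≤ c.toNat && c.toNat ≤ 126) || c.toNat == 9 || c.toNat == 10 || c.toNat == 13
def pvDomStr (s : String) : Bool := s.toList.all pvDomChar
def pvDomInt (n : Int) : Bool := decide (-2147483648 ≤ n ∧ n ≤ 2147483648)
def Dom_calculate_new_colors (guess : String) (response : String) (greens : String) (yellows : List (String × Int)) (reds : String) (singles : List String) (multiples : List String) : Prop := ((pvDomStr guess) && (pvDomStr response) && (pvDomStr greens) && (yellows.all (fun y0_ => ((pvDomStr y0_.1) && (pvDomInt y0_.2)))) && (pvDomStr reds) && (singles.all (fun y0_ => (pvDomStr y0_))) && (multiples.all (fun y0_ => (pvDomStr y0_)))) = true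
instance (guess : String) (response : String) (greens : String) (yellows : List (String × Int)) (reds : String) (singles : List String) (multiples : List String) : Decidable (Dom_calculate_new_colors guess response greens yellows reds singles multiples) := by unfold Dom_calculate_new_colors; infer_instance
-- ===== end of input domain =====

-- B replaces A's two stateful loops (incrementally grown good_letters set) by independent
-- comprehensions over enumerate(response) (objective: simpler). A mutates yellows/singles/
-- multiples in place; B performs the same mutations in Python, but the equivalence proved
-- here is about the RETURN value (new_greens, reds) only, so neither port models them.
-- Char.toUpper is exact for Python str.upper on the one-char ASCII strings Dom admits.

-- ===== PORT A =====
-- first loop of A: builds new_greens and the good_letters set as it scans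
def pvALoop1 (g gr : List Char) : List Char → Nat → List Char → PySem.Set Char → List Char × PySem.Set Char
  | [], _, ng, good => (ng, good)
  | c :: rest, idx, ng, good =>
    if c.toUpper = 'G' then
      pvALoop1 g gr rest (idx+1) (ng ++ [PySem.List.pyGetD g (idx : Int) '?'])
        (PySem.Set.add good (PySem.List.pyGetD g (idx : Int) '?'))
    else if c.toUpper = 'Y' then
      pvALoop1 g gr rest (idx+1) (ng ++ [PySem.List.pyGetD gr (idx : Int) '?'])
        (PySem.Set.add good (PySem.List.pyGetD g (idx : Int) '?'))
    else
      pvALoop1 g gr rest (idx+1) (ng ++ [PySem.List.pyGetD gr (idx : Int) '?']) good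

-- second loop of A: extends reds with non-G/Y letters not in good_letters
def pvALoop2 (g : List Char) (good : PySem.Set Char) : List Char → Nat → List Char → List Char
  | [], _, red => red
  | c :: rest, idx, red =>
    if c.toUpper ≠ 'G' ∧ c.toUpper ≠ 'Y' then
      if PySem.Set.contains good (PySem.List.pyGetD g (idx : Int) '?') then
        pvALoop2 g good rest (idx+1) red
      else
        pvALoop2 g good rest (idx+1) (red ++ [PySem.List.pyGetD g (idx : Int) '?'])
    else
      pvALoop2 g good rest (idx+1) red

def calculate_new_colors (guess : String) (response : String) (greens : String) (yellows : List (String × Int)) (reds : String) (singles : List String) (multiples : List String) : String × String :=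
  let p := pvALoop1 guess.toList greens.toList response.toList 0 [] PySem.Set.empty
  let red := pvALoop2 guess.toList p.2 response.toList 0 reds.toList
  (String.ofList p.1, String.ofList red)

-- ===== PORT B =====
def pvIsGY (c : Char) : Bool := c.toUpper == 'G' || c.toUpper == 'Y'

def calculate_new_colors_alt (guess : String) (response : String) (greens : String) (yellows : List (String × Int)) (reds : String) (singles : List String) (multiples : List String) : String × String :=
  let g := guess.toList
  let en := PySem.List.enumerate response.toList 0
  let gy := en.filterMap (fun p => if pvIsGY p.2 then some (PySem.List.pyGetD g p.1 '?') else none)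
  let good : PySem.Set Char := PySem.Set.ofList gy
  let new_greens := en.map (fun p => if p.2.toUpper == 'G' then PySem.List.pyGetD g p.1 '?' else PySem.List.pyGetD greens.toList p.1 '?')
  let bad := en.filterMap (fun p => if !pvIsGY p.2 then some (PySem.List.pyGetD g p.1 '?') else none)
  (String.ofList new_greens, String.ofList (reds.toList ++ bad.filter (fun ch => !(PySem.Set.contains good ch))))

-- ===== PRECONDITION & SPEC =====
-- Pre_: exactly the inputs where Python A returns (no IndexError): guess covers every
-- response position, and greens covers every non-G response position.
def Pre_calculate_new_colors (guess : String) (response : String) (greens : String) (yellows : List (String × Int)) (reds : String) (singles : List String) (multiples : List String) : Prop :=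
  response.toList.length ≤ guess.toList.length ∧
    ∀ p ∈ PySem.List.enumerate response.toList 0, (p.2.toUpper = 'G' ∨ p.1 < (greens.toList.length : Int))
instance (guess : String) (response : String) (greens : String) (yellows : List (String × Int)) (reds : String) (singles : List String) (multiples : List String) : Decidable (Pre_calculate_new_colors guess response greens yellows reds singles multiples) := by unfold Pre_calculate_new_colors; infer_instance

def pvWitness_calculate_new_colors : String × String × String × (List (String × Int)) × String × List String × List String :=
  ("crane", "GYbGx", "house", [("q", 1)], "r", ["z"], [])

def Spec_calculate_new_colors (guess : String) (response : String) (greens : String) (yellows : List (String × Int)) (reds : String) (singles : List String) (multiples : List String) (out : String × String) : Prop := out = calculate_new_colors_alt guess response greens yellows reds singles multiples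
instance (guess : String) (response : String) (greens : String) (yellows : List (String × Int)) (reds : String) (singles : List String) (multiples : List String) (out : String × String) : Decidable (Spec_calculate_new_colors guess response greens yellows reds singles multiples out) := by unfold Spec_calculate_new_colors; infer_instance

-- ===== CLAIM (what is proved, stated in full; the proofs are below) =====
def Claim_equal_calculate_new_colors : Prop := ∀ (guess : String) (response : String) (greens : String) (yellows : List (String × Int)) (reds : String) (singles : List String) (multiples : List String), Dom_calculate_new_colors guess response greens yellows reds singles multiples → Pre_calculate_new_colors guess response greens yellows reds singles multiples → Spec_calculate_new_colors guess response greens yellows reds singles multiples (calculate_new_colors guess response greens yellows reds singles multiples)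

-- ===== LEMMAS AND PROOFS =====
-- index-threaded characterisations of the three per-position sequences
def pvNGs (g gr : List Char) : List Char → Nat → List Char
  | [], _ => []
  | c :: rest, idx =>
    (if c.toUpper = 'G' then g.getD idx '?' else gr.getD idx '?') :: pvNGs g gr rest (idx+1)

def pvGYs (g : List Char) : List Char → Nat → List Char
  | [], _ => []
  | c :: rest, idx =>
    if pvIsGY c then g.getD idx '?' :: pvGYs g rest (idx+1) else pvGYs g rest (idx+1)

def pvBads (g : List Char) : List Char → Nat → List Char
  | [], _ => []
  | c :: rest, idx =>
    if pvIsGY c then pvBads g rest (idx+1) else g.getD idx '?' :: pvBads g rest (idx+1)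

theorem pvALoop1_eq (g gr : List Char) : ∀ (cs : List Char) (idx : Nat) (ng : List Char) (good : PySem.Set Char),
    pvALoop1 g gr cs idx ng good = (ng ++ pvNGs g gr cs idx, PySem.Set.update good (pvGYs g cs idx)) := by
  intro cs
  induction cs with
  | nil => intro idx ng good; simp [pvALoop1, pvNGs, pvGYs, PySem.Set.update_nil]
  | cons c rest ih =>
    intro idx ng good
    by_cases hG : c.toUpper = 'G'
    · simp [pvALoop1, pvNGs, pvGYs, pvIsGY, hG, ih, PySem.Set.update_cons]
    · by_cases hY : c.toUpper = 'Y'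
      · simp [pvALoop1, pvNGs, pvGYs, pvIsGY, hY, ih, PySem.Set.update_cons]
      · simp [pvALoop1, pvNGs, pvGYs, pvIsGY, hG, hY, ih]

theorem pvALoop2_eq (g : List Char) (good : PySem.Set Char) : ∀ (cs : List Char) (idx : Nat) (red : List Char),
    pvALoop2 g good cs idx red = red ++ (pvBads g cs idx).filter (fun ch => !(PySem.Set.contains good ch)) := by
  intro cs
  induction cs with
  | nil => intro idx red; simp [pvALoop2, pvBads]
  | cons c rest ih =>
    intro idx red
    by_cases hGY : c.toUpper ≠ 'G' ∧ c.toUpper ≠ 'Y'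
    · have hb : pvIsGY c = false := by simp [pvIsGY, hGY.1, hGY.2]
      by_cases hm : (g[idx]?.getD '?') ∈ good
      · simp [pvALoop2, pvBads, hGY, hb, hm, ih]
      · simp [pvALoop2, pvBads, hGY, hb, hm, ih]
    · have hb : pvIsGY c = true := by
        simp [pvIsGY]
        rcases not_and_or.mp hGY with h | h
        · exact Or.inl (not_not.mp h)
        · exact Or.inr (not_not.mp h)
      simp [pvALoop2, pvBads, hGY, hb, ih]

theorem pv_en_map (g gr : List Char) : ∀ (cs : List Char) (idx : Nat),
    (PySem.List.enumerate cs (idx : Int)).map (fun p => if p.2.toUpper == 'G' then PySem.List.pyGetD g p.1 '?' else PySem.List.pyGetD gr p.1 '?') = pvNGs g gr cs idx := by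
  intro cs
  induction cs with
  | nil => intro idx; simp [PySem.List.enumerate_nil, pvNGs]
  | cons c rest ih =>
    intro idx
    rw [PySem.List.enumerate_cons, List.map_cons,
      show ((idx : Int) + 1) = ((idx + 1 : Nat) : Int) by push_cast; ring, ih]
    simp [pvNGs]

theorem pv_en_gy (g : List Char) : ∀ (cs : List Char) (idx : Nat),
    (PySem.List.enumerate cs (idx : Int)).filterMap (fun p => if pvIsGY p.2 then some (PySem.List.pyGetD g p.1 '?') else none) = pvGYs g cs idx := by
  intro cs
  induction cs with
  | nil => intro idx; simp [PySem.List.enumerate_nil, pvGYs]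
  | cons c rest ih =>
    intro idx
    rw [PySem.List.enumerate_cons, List.filterMap_cons,
      show ((idx : Int) + 1) = ((idx + 1 : Nat) : Int) by push_cast; ring, ih]
    by_cases hb : pvIsGY c
    · simp [pvGYs, hb]
    · simp [pvGYs, hb]

theorem pv_en_bad (g : List Char) : ∀ (cs : List Char) (idx : Nat),
    (PySem.List.enumerate cs (idx : Int)).filterMap (fun p => if !pvIsGY p.2 then some (PySem.List.pyGetD g p.1 '?') else none) = pvBads g cs idx := by
  intro cs
  induction cs with
  | nil => intro idx; simp [PySem.List.enumerate_nil, pvBads]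
  | cons c rest ih =>
    intro idx
    rw [PySem.List.enumerate_cons, List.filterMap_cons,
      show ((idx : Int) + 1) = ((idx + 1 : Nat) : Int) by push_cast; ring, ih]
    by_cases hb : pvIsGY c
    · simp [pvBads, hb]
    · simp [pvBads, hb]

-- ===== VERDICT (by name: the statement is the Claim_ definition above) =====
theorem calculate_new_colors_spec : Claim_equal_calculate_new_colors := by
  intro guess response greens yellows reds singles multiples _ _
  unfold Spec_calculate_new_colors calculate_new_colors calculate_new_colors_alt
  have e1 := pv_en_map guess.toList greens.toList response.toList 0
  have e2 := pv_en_gy guess.toList response.toList 0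
  have e3 := pv_en_bad guess.toList response.toList 0
  push_cast at e1 e2 e3
  simp only [pvALoop1_eq, pvALoop2_eq, e1, e2, e3]
  simp [PySem.Set.empty, PySem.Set.update_nil_left]
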